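-- pv_equiv track=rewrite | github.com/MowahidLatif/helping-hands-backend | app/utils/ai_media_selection.py | select_media_for_ai_prompt
-- ===== SOURCE A (Python) =====
-- from typing import Any
--
-- _QUEUE_ORDER = ("image", "video", "doc", "embed")
--
-- def select_media_for_ai_prompt(
--     items: list[dict[str, Any]], max_total: int
-- ) -> list[dict[str, Any]]:
--     if max_total <= 0 or not items:
--         return []
--     queues: dict[str, list[dict[str, Any]]] = {
--         "image": [],
--         "video": [],
--         "doc": [],
--         "embed": [],
--     }
--     for m in items:
--         t = str(m.get("type") or "image").lower()
--         if t not in queues: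
--             t = "image"
--         queues[t].append(m)
--
--     selected: list[dict[str, Any]] = []
--     ptrs = {k: 0 for k in _QUEUE_ORDER}
--     while len(selected) < max_total:
--         progressed = False
--         for k in _QUEUE_ORDER:
--             if len(selected) >= max_total:
--                 break
--             q = queues[k]
--             i = ptrs[k]
--             if i < len(q):
--                 selected.append(q[i])
--                 ptrs[k] += 1
--                 progressed = True
--         if not progressed:
--             break
--     return selected
-- ===== SOURCE B (Python) =====
-- from typing import Any
--
-- _QUEUE_ORDER = ("image", "video", "doc", "embed")
--
-- def select_media_for_ai_prompt(
--     items: list[dict[str, Any]], max_total: int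
-- ) -> list[dict[str, Any]]:
--     if max_total <= 0 or not items:
--         return []
--     # One pass: give every item a schedule key (round, type_rank), where `round`
--     # is how many items of its type came before it.  A stable sort by that key
--     # IS the round-robin order; no queues, pointers or interleaving needed.
--     counts = [0, 0, 0, 0]
--     keyed: list[tuple[tuple[int, int], dict[str, Any]]] = []
--     for m in items:
--         t = str(m.get("type") or "image").lower()
--         r = _QUEUE_ORDER.index(t) if t in _QUEUE_ORDER else 0
--         keyed.append(((counts[r], r), m))
--         counts[r] += 1
--     keyed.sort(key=lambda e: e[0])
--     return [m for _, m in keyed[:max_total]]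
-- ===== Notes on version B (the rewrite author's own statement) =====
-- stated objective: alternative
-- what changed: Replaces A's four type queues and while/pointer/progressed round-robin loop with a schedule-key construction: one pass assigns each item the key (occurrences-of-its-type-so-far, type rank), a stable sort by that key yields the round-robin order, and the first max_total items are returned.
import Mathlib
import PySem

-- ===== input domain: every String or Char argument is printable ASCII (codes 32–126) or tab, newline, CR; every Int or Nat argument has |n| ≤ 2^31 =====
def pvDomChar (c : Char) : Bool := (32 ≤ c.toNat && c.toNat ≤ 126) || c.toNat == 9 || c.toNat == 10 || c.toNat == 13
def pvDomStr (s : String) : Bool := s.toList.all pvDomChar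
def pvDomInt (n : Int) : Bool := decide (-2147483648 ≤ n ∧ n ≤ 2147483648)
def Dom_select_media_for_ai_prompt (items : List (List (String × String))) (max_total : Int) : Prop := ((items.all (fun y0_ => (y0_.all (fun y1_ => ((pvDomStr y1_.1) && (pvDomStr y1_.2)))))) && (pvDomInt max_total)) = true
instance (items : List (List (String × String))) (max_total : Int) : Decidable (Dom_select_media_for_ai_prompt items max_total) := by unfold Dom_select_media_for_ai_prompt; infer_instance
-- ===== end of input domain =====

-- B drops A's four type queues and pointer round-robin loop: one pass gives each item the
-- schedule key (occurrences-of-its-type-so-far, type rank), a stable sort by that key is the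
-- round-robin order, sliced to max_total (objective: alternative).

-- ===== PORT A =====
-- t = str(m.get("type") or "image").lower(); if t not in queues: t = "image"
def pvNormType (m : List (String × String)) : String :=
  let t0 := match m.lookup "type" with
    | none => "image"                              -- m.get("type") is None (falsy)
    | some s => if s = "" then "image" else s      -- "" is falsy; str() of a str is itself
  let t := PySem.Str.lower t0
  if t = "image" || t = "video" || t = "doc" || t = "embed" then t else "image"

-- queues["image"/"video"/"doc"/"embed"].append(m), as a fold over items
def pvBuckets (items : List (List (String × String))) :
    List (List (String × String)) × List (List (String × String)) ×
    List (List (String × String)) × List (List (String × String)) :=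
  items.foldl
    (fun acc m =>
      let t := pvNormType m
      if t = "video" then (acc.1, acc.2.1 ++ [m], acc.2.2.1, acc.2.2.2)
      else if t = "doc" then (acc.1, acc.2.1, acc.2.2.1 ++ [m], acc.2.2.2)
      else if t = "embed" then (acc.1, acc.2.1, acc.2.2.1, acc.2.2.2 ++ [m])
      else (acc.1 ++ [m], acc.2.1, acc.2.2.1, acc.2.2.2))
    ([], [], [], [])

-- one step of A's inner `for k in _QUEUE_ORDER` body for one queue k:
-- break-check `len(selected) >= max_total`, then append q[i] and advance the pointer
def pvStep (max_total : Int) (q : List (List (String × String)))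
    (sel : List (List (String × String))) (p : Nat) :
    List (List (String × String)) × Nat × Bool :=
  if (sel.length : Int) ≥ max_total then (sel, p, false)
  else if p < q.length then (sel ++ [q.getD p []], p + 1, true)
  else (sel, p, false)

-- A's `while len(selected) < max_total` loop, with the four-key for-loop unrolled.
-- `fuel` only makes the recursion structural (kernel-computable); the caller passes
-- total queue length + 1, which always suffices (each progressing pass consumes ≥ 1 element).
def pvLoopA (fuel : Nat) (max_total : Int)
    (qi qv qd qe : List (List (String × String)))
    (pi pv pd pe : Nat) (sel : List (List (String × String))) :
    List (List (String × String)) :=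
  match fuel with
  | 0 => sel
  | fuel + 1 =>
    if (sel.length : Int) < max_total then
      let r1 := pvStep max_total qi sel pi
      let r2 := pvStep max_total qv r1.1 pv
      let r3 := pvStep max_total qd r2.1 pd
      let r4 := pvStep max_total qe r3.1 pe
      if r1.2.2 || r2.2.2 || r3.2.2 || r4.2.2 then
        pvLoopA fuel max_total qi qv qd qe r1.2.1 r2.2.1 r3.2.1 r4.2.1 r4.1
      else r4.1
    else sel

def select_media_for_ai_prompt (items : List (List (String × String))) (max_total : Int) :
    List (List (String × String)) :=
  if max_total ≤ 0 || items.isEmpty then []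
  else
    let q := pvBuckets items
    pvLoopA (q.1.length + q.2.1.length + q.2.2.1.length + q.2.2.2.length + 1)
      max_total q.1 q.2.1 q.2.2.1 q.2.2.2 0 0 0 0 []

-- ===== PORT B =====
-- r = _QUEUE_ORDER.index(t) if t in _QUEUE_ORDER else 0   (t computed by the same two
-- lines as in Source A, hence via the shared pvNormType)
def pvRankB (m : List (String × String)) : Int :=
  let t := pvNormType m
  if t = "video" then 1 else if t = "doc" then 2 else if t = "embed" then 3 else 0

-- the for-loop of Source B: state = (keyed, counts[0], counts[1], counts[2], counts[3])
def pvKeyedFold (items : List (List (String × String))) :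
    List ((Int × Int) × List (String × String)) × Int × Int × Int × Int :=
  items.foldl
    (fun acc m =>
      let r := pvRankB m
      let c := if r = 1 then acc.2.2.1 else if r = 2 then acc.2.2.2.1
               else if r = 3 then acc.2.2.2.2 else acc.2.1
      let keyed := acc.1 ++ [((c, r), m)]        -- keyed.append(((counts[r], r), m))
      if r = 1 then (keyed, acc.2.1, acc.2.2.1 + 1, acc.2.2.2.1, acc.2.2.2.2)
      else if r = 2 then (keyed, acc.2.1, acc.2.2.1, acc.2.2.2.1 + 1, acc.2.2.2.2)
      else if r = 3 then (keyed, acc.2.1, acc.2.2.1, acc.2.2.2.1, acc.2.2.2.2 + 1)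
      else (keyed, acc.2.1 + 1, acc.2.2.1, acc.2.2.2.1, acc.2.2.2.2))
    ([], 0, 0, 0, 0)

def select_media_for_ai_prompt_alt (items : List (List (String × String))) (max_total : Int) :
    List (List (String × String)) :=
  if max_total ≤ 0 || items.isEmpty then []
  else
    let keyed := (pvKeyedFold items).1
    -- keyed.sort(key=lambda e: e[0]) — stable sort on the (round, rank) pair
    let s := PySem.List.sorted2 keyed (fun e => e.1.1) (fun e => e.1.2)
    (PySem.List.slice s none (some max_total)).map (fun e => e.2)   -- keyed[:max_total], strip keys

-- ===== PRECONDITION & SPEC =====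
def Spec_select_media_for_ai_prompt (items : List (List (String × String))) (max_total : Int) (out : List (List (String × String))) : Prop := out = select_media_for_ai_prompt_alt items max_total
instance (items : List (List (String × String))) (max_total : Int) (out : List (List (String × String))) : Decidable (Spec_select_media_for_ai_prompt items max_total out) := by unfold Spec_select_media_for_ai_prompt; infer_instance

-- ===== CLAIM (what is proved, stated in full; the proofs are below) =====
def Claim_equal_select_media_for_ai_prompt : Prop := ∀ (items : List (List (String × String))) (max_total : Int), Dom_select_media_for_ai_prompt items max_total → Spec_select_media_for_ai_prompt items max_total (select_media_for_ai_prompt items max_total)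

-- ===== LEMMAS AND PROOFS =====

-- ---- proof-only helpers: the round-robin interleave of the four buckets ----
def pvRoundsF (fuel : Nat) (qi qv qd qe : List (List (String × String))) :
    List (List (String × String)) :=
  match fuel with
  | 0 => []
  | fuel + 1 =>
    if qi.isEmpty && qv.isEmpty && qd.isEmpty && qe.isEmpty then []
    else (qi.take 1 ++ qv.take 1 ++ qd.take 1 ++ qe.take 1)
         ++ pvRoundsF fuel qi.tail qv.tail qd.tail qe.tail

def pvRounds (qi qv qd qe : List (List (String × String))) :
    List (List (String × String)) :=
  pvRoundsF (qi.length + qv.length + qd.length + qe.length) qi qv qd qe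

-- the same interleave with the schedule keys attached
def pvKRF (fuel : Nat) (k : Int) (qi qv qd qe : List (List (String × String))) :
    List ((Int × Int) × List (String × String)) :=
  match fuel with
  | 0 => []
  | fuel + 1 =>
    if qi.isEmpty && qv.isEmpty && qd.isEmpty && qe.isEmpty then []
    else ((qi.take 1).map (fun m => ((k, 0), m)) ++ (qv.take 1).map (fun m => ((k, 1), m))
          ++ (qd.take 1).map (fun m => ((k, 2), m)) ++ (qe.take 1).map (fun m => ((k, 3), m)))
         ++ pvKRF fuel (k + 1) qi.tail qv.tail qd.tail qe.tail

-- a bucket annotated with keys ((k, r), ·), ((k+1, r), ·), …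
def pvAnnot (k r : Int) : List (List (String × String)) → List ((Int × Int) × List (String × String))
  | [] => []
  | x :: xs => ((k, r), x) :: pvAnnot (k + 1) r xs

def pvAnnot4 (k : Int) (qi qv qd qe : List (List (String × String))) :
    List ((Int × Int) × List (String × String)) :=
  pvAnnot k 0 qi ++ pvAnnot k 1 qv ++ pvAnnot k 2 qd ++ pvAnnot k 3 qe

lemma pvNormAux (t : String) :
    (if t = "image" || t = "video" || t = "doc" || t = "embed" then t else "image") = "image" ∨
    (if t = "image" || t = "video" || t = "doc" || t = "embed" then t else "image") = "video" ∨
    (if t = "image" || t = "video" || t = "doc" || t = "embed" then t else "image") = "doc" ∨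
    (if t = "image" || t = "video" || t = "doc" || t = "embed" then t else "image") = "embed" := by
  split
  next h =>
    simp only [Bool.or_eq_true, decide_eq_true_eq] at h
    tauto
  next h => left; rfl


lemma pvNormType_cases (m : List (String × String)) :
    pvNormType m = "image" ∨ pvNormType m = "video" ∨ pvNormType m = "doc" ∨ pvNormType m = "embed" := by
  exact pvNormAux _


lemma pvAnnot_append_singleton (k r : Int) (q : List (List (String × String))) (m : List (String × String)) :
    pvAnnot k r (q ++ [m]) = pvAnnot k r q ++ [((k + q.length, r), m)] := by
  induction q generalizing k with
  | nil => simp [pvAnnot]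
  | cons x xs ih =>
    simp only [List.cons_append, pvAnnot, ih]
    have h : k + 1 + (xs.length : Int) = k + ((x :: xs).length : Int) := by push_cast [List.length_cons]; ring
    rw [h]


lemma pvAnnot_head (k r : Int) (q : List (List (String × String))) :
    pvAnnot k r q = (q.take 1).map (fun m => ((k, r), m)) ++ pvAnnot (k + 1) r q.tail := by
  cases q <;> simp [pvAnnot]


-- proof-side names for the two fold bodies (definitionally the ones in the ports)
def pvStepB (acc : List ((Int × Int) × List (String × String)) × Int × Int × Int × Int)
    (m : List (String × String)) :
    List ((Int × Int) × List (String × String)) × Int × Int × Int × Int :=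
  let r := pvRankB m
  let c := if r = 1 then acc.2.2.1 else if r = 2 then acc.2.2.2.1
           else if r = 3 then acc.2.2.2.2 else acc.2.1
  let keyed := acc.1 ++ [((c, r), m)]
  if r = 1 then (keyed, acc.2.1, acc.2.2.1 + 1, acc.2.2.2.1, acc.2.2.2.2)
  else if r = 2 then (keyed, acc.2.1, acc.2.2.1, acc.2.2.2.1 + 1, acc.2.2.2.2)
  else if r = 3 then (keyed, acc.2.1, acc.2.2.1, acc.2.2.2.1, acc.2.2.2.2 + 1)
  else (keyed, acc.2.1 + 1, acc.2.2.1, acc.2.2.2.1, acc.2.2.2.2)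

def pvStepA (acc : List (List (String × String)) × List (List (String × String)) ×
    List (List (String × String)) × List (List (String × String)))
    (m : List (String × String)) :
    List (List (String × String)) × List (List (String × String)) ×
    List (List (String × String)) × List (List (String × String)) :=
  let t := pvNormType m
  if t = "video" then (acc.1, acc.2.1 ++ [m], acc.2.2.1, acc.2.2.2)
  else if t = "doc" then (acc.1, acc.2.1, acc.2.2.1 ++ [m], acc.2.2.2)
  else if t = "embed" then (acc.1, acc.2.1, acc.2.2.1, acc.2.2.2 ++ [m])
  else (acc.1 ++ [m], acc.2.1, acc.2.2.1, acc.2.2.2)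

lemma pvKeyedFold_eq (items : List (List (String × String))) :
    pvKeyedFold items = items.foldl pvStepB ([], 0, 0, 0, 0) := rfl

lemma pvBuckets_eq (items : List (List (String × String))) :
    pvBuckets items = items.foldl pvStepA ([], [], [], []) := rfl

-- (1) the keyed one-pass fold of Source B produces (a permutation of) the annotated buckets,
--     with the counters tracking the bucket lengths
lemma perm_insert4 (keyed A1 A2 A3 A4 : List ((Int × Int) × List (String × String)))
    (x : (Int × Int) × List (String × String))
    (h : keyed.Perm (A1 ++ A2 ++ A3 ++ A4)) :
    ((keyed ++ [x]).Perm (A1 ++ A2 ++ A3 ++ (A4 ++ [x]))) ∧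
    ((keyed ++ [x]).Perm (A1 ++ A2 ++ (A3 ++ [x]) ++ A4)) ∧
    ((keyed ++ [x]).Perm (A1 ++ (A2 ++ [x]) ++ A3 ++ A4)) ∧
    ((keyed ++ [x]).Perm ((A1 ++ [x]) ++ A2 ++ A3 ++ A4)) := by
  rw [← Multiset.coe_eq_coe] at h
  refine ⟨?_, ?_, ?_, ?_⟩ <;>
    · rw [← Multiset.coe_eq_coe]
      simp only [← Multiset.coe_add, List.append_assoc] at h ⊢
      rw [h]  -- placeholder check
      abel


lemma keyedFold_inv (items : List (List (String × String))) :
    ∀ (keyed : List ((Int × Int) × List (String × String)))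
      (qi qv qd qe : List (List (String × String))),
      keyed.Perm (pvAnnot4 0 qi qv qd qe) →
      (items.foldl pvStepB
          (keyed, (qi.length : Int), (qv.length : Int), (qd.length : Int), (qe.length : Int))).1.Perm
        (pvAnnot4 0 (items.foldl pvStepA (qi, qv, qd, qe)).1
          (items.foldl pvStepA (qi, qv, qd, qe)).2.1
          (items.foldl pvStepA (qi, qv, qd, qe)).2.2.1
          (items.foldl pvStepA (qi, qv, qd, qe)).2.2.2) := by
  induction items with
  | nil => intro keyed qi qv qd qe h; simpa using h
  | cons m rest ih =>
    intro keyed qi qv qd qe h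
    rcases pvNormType_cases m with ht | ht | ht | ht <;>
      have hr : pvRankB m = (if pvNormType m = "video" then 1 else if pvNormType m = "doc" then 2
        else if pvNormType m = "embed" then 3 else 0 : Int) := rfl <;>
      rw [ht] at hr <;> norm_num at hr
    · -- image
      simp only [List.foldl_cons, pvStepB, pvStepA, hr, ht]
      norm_num
      have h2 := (perm_insert4 _ _ _ _ _ ((((qi.length : Int), 0), m)) h).2.2.2
      have h3 : pvAnnot 0 0 (qi ++ [m]) = pvAnnot 0 0 qi ++ [(((qi.length : Int), 0), m)] := by
        rw [pvAnnot_append_singleton]; norm_num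
      have := ih (keyed ++ [(((qi.length : Int), 0), m)]) (qi ++ [m]) qv qd qe
        (by simp only [pvAnnot4, h3] at h2 ⊢
            simpa [List.append_assoc] using h2)
      simpa [List.length_append] using this
    · -- video
      simp only [List.foldl_cons, pvStepB, pvStepA, hr, ht]
      norm_num
      have h2 := (perm_insert4 _ _ _ _ _ ((((qv.length : Int), 1), m)) h).2.2.1
      have h3 : pvAnnot 0 1 (qv ++ [m]) = pvAnnot 0 1 qv ++ [(((qv.length : Int), 1), m)] := by
        rw [pvAnnot_append_singleton]; norm_num
      have := ih (keyed ++ [(((qv.length : Int), 1), m)]) qi (qv ++ [m]) qd qe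
        (by simp only [pvAnnot4, h3] at h2 ⊢
            simpa [List.append_assoc] using h2)
      simpa [List.length_append] using this
    · -- doc
      simp only [List.foldl_cons, pvStepB, pvStepA, hr, ht]
      norm_num
      have h2 := (perm_insert4 _ _ _ _ _ ((((qd.length : Int), 2), m)) h).2.1
      have h3 : pvAnnot 0 2 (qd ++ [m]) = pvAnnot 0 2 qd ++ [(((qd.length : Int), 2), m)] := by
        rw [pvAnnot_append_singleton]; norm_num
      have := ih (keyed ++ [(((qd.length : Int), 2), m)]) qi qv (qd ++ [m]) qe
        (by simp only [pvAnnot4, h3] at h2 ⊢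
            simpa [List.append_assoc] using h2)
      simpa [List.length_append] using this
    · -- embed
      simp only [List.foldl_cons, pvStepB, pvStepA, hr, ht]
      norm_num
      have h2 := (perm_insert4 _ _ _ _ _ ((((qe.length : Int), 3), m)) h).1
      have h3 : pvAnnot 0 3 (qe ++ [m]) = pvAnnot 0 3 qe ++ [(((qe.length : Int), 3), m)] := by
        rw [pvAnnot_append_singleton]; norm_num
      have := ih (keyed ++ [(((qe.length : Int), 3), m)]) qi qv qd (qe ++ [m])
        (by simp only [pvAnnot4, h3] at h2 ⊢
            simpa [List.append_assoc] using h2)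
      simpa [List.length_append] using this


-- (2) the keyed interleave: strip of keys, permutation to the annotated buckets,
--     strictly increasing schedule keys
lemma pvKRF_map_snd (fuel : Nat) : ∀ (k : Int) (qi qv qd qe : List (List (String × String))),
    (pvKRF fuel k qi qv qd qe).map (fun e => e.2) = pvRoundsF fuel qi qv qd qe := by
  induction fuel with
  | zero => intro k qi qv qd qe; rfl
  | succ f ih =>
    intro k qi qv qd qe
    simp only [pvKRF, pvRoundsF]
    split
    · rfl
    · simp [List.map_map, ih, Function.comp]


lemma pvKRF_perm (fuel : Nat) : ∀ (k : Int) (qi qv qd qe : List (List (String × String))),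
    qi.length + qv.length + qd.length + qe.length ≤ fuel →
    (pvKRF fuel k qi qv qd qe).Perm (pvAnnot4 k qi qv qd qe) := by
  induction fuel with
  | zero =>
    intro k qi qv qd qe h
    obtain rfl : qi = [] := by cases qi <;> simp_all
    obtain rfl : qv = [] := by cases qv <;> simp_all
    obtain rfl : qd = [] := by cases qd <;> simp_all
    obtain rfl : qe = [] := by cases qe <;> simp_all
    simp [pvKRF, pvAnnot4, pvAnnot]
  | succ f ih =>
    intro k qi qv qd qe h
    simp only [pvKRF]
    split
    next hE =>
      obtain ⟨rfl, rfl, rfl, rfl⟩ : qi = [] ∧ qv = [] ∧ qd = [] ∧ qe = [] := by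
        simp_all [List.isEmpty_iff]
      simp [pvAnnot4, pvAnnot]
    next hE =>
      have hP := ih (k + 1) qi.tail qv.tail qd.tail qe.tail
        (by simp only [List.length_tail]; omega)
      rw [← Multiset.coe_eq_coe] at hP ⊢
      simp only [pvAnnot4] at hP ⊢
      rw [pvAnnot_head k 0 qi, pvAnnot_head k 1 qv, pvAnnot_head k 2 qd, pvAnnot_head k 3 qe]
      simp only [← Multiset.coe_add, List.append_assoc] at hP ⊢
      rw [hP]
      abel


lemma pvKRF_mem_fst (fuel : Nat) : ∀ (k : Int) (qi qv qd qe : List (List (String × String))),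
    ∀ e ∈ pvKRF fuel k qi qv qd qe, k ≤ e.1.1 := by
  induction fuel with
  | zero => intro k qi qv qd qe e he; simp [pvKRF] at he
  | succ f ih =>
    intro k qi qv qd qe e he
    simp only [pvKRF] at he
    split at he
    · simp at he
    · rcases List.mem_append.mp he with h | h
      · rcases List.mem_append.mp h with h | h
        · rcases List.mem_append.mp h with h | h
          · rcases List.mem_append.mp h with h | h <;>
              · rcases List.mem_map.mp h with ⟨m, _, rfl⟩; simp
          · rcases List.mem_map.mp h with ⟨m, _, rfl⟩; simp
        · rcases List.mem_map.mp h with ⟨m, _, rfl⟩; simp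
      · have := ih (k + 1) _ _ _ _ e h; omega


lemma pairwiseH (k r : Int) (q : List (List (String × String))) :
    ((q.take 1).map (fun m => ((k, r), m))).Pairwise
      (fun a b => toLex (a.1.1, a.1.2) < toLex (b.1.1, b.1.2)) := by
  cases q <;> simp


lemma memH {k r : Int} {q : List (List (String × String))}
    {e : (Int × Int) × List (String × String)}
    (h : e ∈ (q.take 1).map (fun m => ((k, r), m))) : e.1.1 = k ∧ e.1.2 = r := by
  rcases List.mem_map.mp h with ⟨m, _, rfl⟩; simp


lemma pvKRF_pairwise (fuel : Nat) : ∀ (k : Int) (qi qv qd qe : List (List (String × String))),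
    (pvKRF fuel k qi qv qd qe).Pairwise
      (fun a b => toLex (a.1.1, a.1.2) < toLex (b.1.1, b.1.2)) := by
  induction fuel with
  | zero => intro k qi qv qd qe; simp [pvKRF]
  | succ f ih =>
    intro k qi qv qd qe
    simp only [pvKRF]
    split
    · simp
    · have hlex : ∀ (a b : (Int × Int) × List (String × String)),
        a.1.1 < b.1.1 ∨ (a.1.1 = b.1.1 ∧ a.1.2 < b.1.2) →
        toLex (a.1.1, a.1.2) < toLex (b.1.1, b.1.2) := by
        intro a b h
        rw [Prod.Lex.toLex_lt_toLex]
        exact h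
      refine List.pairwise_append.mpr ⟨?_, ih (k + 1) _ _ _ _, ?_⟩
      · refine List.pairwise_append.mpr ⟨?_, ?_, ?_⟩
        · refine List.pairwise_append.mpr ⟨?_, ?_, ?_⟩
          · refine List.pairwise_append.mpr ⟨pairwiseH k 0 qi, pairwiseH k 1 qv, ?_⟩
            · intro a ha b hb
              have := memH ha; have := memH hb
              exact hlex a b (by omega)
          · exact pairwiseH k 2 qd
          · intro a ha b hb
            have hb' := memH hb
            rcases List.mem_append.mp ha with h | h <;>
              · have := memH h; exact hlex a b (by omega)
        · exact pairwiseH k 3 qe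
        · intro a ha b hb
          have hb' := memH hb
          rcases List.mem_append.mp ha with h | h
          · rcases List.mem_append.mp h with h | h <;>
              · have := memH h; exact hlex a b (by omega)
          · have := memH h; exact hlex a b (by omega)
      · intro a ha b hb
        have hb' := pvKRF_mem_fst f (k + 1) _ _ _ _ b hb
        have ha' : a.1.1 = k := by
          rcases List.mem_append.mp ha with h | h
          · rcases List.mem_append.mp h with h | h
            · rcases List.mem_append.mp h with h | h <;> exact (memH h).1
            · exact (memH h).1
          · exact (memH h).1
        exact hlex a b (by omega)


lemma pvRoundsF_congr : ∀ (f g : Nat) (qi qv qd qe : List (List (String × String))),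
    qi.length + qv.length + qd.length + qe.length ≤ f →
    qi.length + qv.length + qd.length + qe.length ≤ g →
    pvRoundsF f qi qv qd qe = pvRoundsF g qi qv qd qe := by
  intro f
  induction f with
  | zero =>
    intro g qi qv qd qe hf hg
    obtain rfl : qi = [] := by cases qi <;> simp_all
    obtain rfl : qv = [] := by cases qv <;> simp_all
    obtain rfl : qd = [] := by cases qd <;> simp_all
    obtain rfl : qe = [] := by cases qe <;> simp_all
    cases g <;> simp [pvRoundsF]
  | succ f ihf =>
    intro g qi qv qd qe hf hg
    cases g with
    | zero =>
      obtain rfl : qi = [] := by cases qi <;> simp_all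
      obtain rfl : qv = [] := by cases qv <;> simp_all
      obtain rfl : qd = [] := by cases qd <;> simp_all
      obtain rfl : qe = [] := by cases qe <;> simp_all
      simp [pvRoundsF]
    | succ g =>
      simp only [pvRoundsF]
      by_cases hE : (qi.isEmpty && qv.isEmpty && qd.isEmpty && qe.isEmpty) = true
      · simp [hE]
      · simp only [hE, Bool.false_eq_true, if_false]
        congr 1
        have hL : 1 ≤ qi.length ∨ 1 ≤ qv.length ∨ 1 ≤ qd.length ∨ 1 ≤ qe.length := by
          rcases qi with _ | _ <;> rcases qv with _ | _ <;> rcases qd with _ | _ <;>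
            rcases qe with _ | _ <;> simp_all
        apply ihf <;> simp only [List.length_tail] <;> omega

lemma pvRounds_nil : pvRounds ([] : List (List (String × String))) [] [] [] = [] := rfl

lemma pvRounds_eq (qi qv qd qe : List (List (String × String))) :
    pvRounds qi qv qd qe =
      if qi.isEmpty && qv.isEmpty && qd.isEmpty && qe.isEmpty then []
      else (qi.take 1 ++ qv.take 1 ++ qd.take 1 ++ qe.take 1)
           ++ pvRounds qi.tail qv.tail qd.tail qe.tail := by
  by_cases hE : (qi.isEmpty && qv.isEmpty && qd.isEmpty && qe.isEmpty) = true
  · obtain ⟨rfl, rfl, rfl, rfl⟩ :  qi = [] ∧ qv = [] ∧ qd = [] ∧ qe = [] := by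
      simp_all [List.isEmpty_iff]
    simp [pvRounds, pvRoundsF]
  · have hL : 1 ≤ qi.length ∨ 1 ≤ qv.length ∨ 1 ≤ qd.length ∨ 1 ≤ qe.length := by
      rcases qi with _ | _ <;> rcases qv with _ | _ <;> rcases qd with _ | _ <;>
        rcases qe with _ | _ <;> simp_all
    unfold pvRounds
    rw [(by omega : qi.length + qv.length + qd.length + qe.length =
          (qi.length + qv.length + qd.length + qe.length - 1) + 1)]
    simp only [pvRoundsF, hE, Bool.false_eq_true, if_false]
    congr 1
    apply pvRoundsF_congr <;> simp only [List.length_tail] <;> omega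

lemma leafKey {a : Type} (selN sel heads R R' : List a) (n m : Nat)
    (hS : selN = sel ++ heads.take n)
    (h2 : m = n - heads.length)
    (h3 : heads.length <= n -> R' = R) :
    selN ++ R'.take m = sel ++ (heads ++ R).take n := by
  subst hS h2
  by_cases h : heads.length <= n
  · rw [List.take_append, List.take_of_length_le h, h3 h, List.append_assoc]
  · rw [List.take_append, (by omega : n - heads.length = 0)]
    simp

set_option maxHeartbeats 2000000 in
lemma loopA_eq_aux (max_total : Int) (Qi Qv Qd Qe : List (List (String × String))) :
    ∀ (f : Nat) (pi pv pd pe : Nat) (sel : List (List (String × String))),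
    (Qi.length - pi) + (Qv.length - pv) + (Qd.length - pd) + (Qe.length - pe) ≤ f →
    pvLoopA f max_total Qi Qv Qd Qe pi pv pd pe sel =
      sel ++ ((pvRounds (Qi.drop pi) (Qv.drop pv) (Qd.drop pd) (Qe.drop pe)).take
        (max_total.toNat - sel.length)) := by
  intro f
  induction f with
  | zero =>
    intro pi pv pd pe sel h0
    rw [List.drop_eq_nil_of_le (by omega : Qi.length ≤ pi),
        List.drop_eq_nil_of_le (by omega : Qv.length ≤ pv),
        List.drop_eq_nil_of_le (by omega : Qd.length ≤ pd),
        List.drop_eq_nil_of_le (by omega : Qe.length ≤ pe), pvRounds_nil]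
    simp [pvLoopA]
  | succ f ihf =>
    intro pi pv pd pe sel hN
    by_cases hlt : (sel.length : Int) < max_total
    · simp only [pvLoopA, if_pos hlt]
      by_cases e1 : pi < Qi.length <;> by_cases e2 : pv < Qv.length <;>
        by_cases e3 : pd < Qd.length <;> by_cases e4 : pe < Qe.length <;>
        simp only [pvStep, e1, e2, e3, e4, not_le.mpr hlt, List.getD_eq_getElem,
          if_true, if_false, ite_true, ite_false, ite_self,
          Bool.or_self, Bool.or_false, Bool.false_or, Bool.true_or, Bool.or_true,
          List.length_append, List.length_cons, List.length_nil] <;>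
        (try split_ifs) <;>
        (try simp only [List.length_append, List.length_cons, List.length_nil] at *) <;>
        (first
          | omega
          | (rw [List.drop_eq_nil_of_le (by omega : Qi.length ≤ pi),
                 List.drop_eq_nil_of_le (by omega : Qv.length ≤ pv),
                 List.drop_eq_nil_of_le (by omega : Qd.length ≤ pd),
                 List.drop_eq_nil_of_le (by omega : Qe.length ≤ pe), pvRounds_nil]
             simp)
          | (rw [ihf] <;>
             (try (first
               | simp only [List.drop_eq_getElem_cons e1]
               | simp only [List.drop_eq_nil_of_le (Nat.le_of_not_lt e1)])) <;>
             (try (first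
               | simp only [List.drop_eq_getElem_cons e2]
               | simp only [List.drop_eq_nil_of_le (Nat.le_of_not_lt e2)])) <;>
             (try (first
               | simp only [List.drop_eq_getElem_cons e3]
               | simp only [List.drop_eq_nil_of_le (Nat.le_of_not_lt e3)])) <;>
             (try (first
               | simp only [List.drop_eq_getElem_cons e4]
               | simp only [List.drop_eq_nil_of_le (Nat.le_of_not_lt e4)])) <;>
             (try (conv_rhs => rw [pvRounds_eq])) <;>
             (try simp only [List.isEmpty_cons, List.isEmpty_nil, Bool.false_and,
               Bool.and_false, Bool.true_and, Bool.and_true, Bool.and_self,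
               if_true, if_false, ite_true, ite_false, Bool.false_eq_true,
               List.take_succ_cons, List.take_zero, List.take_nil,
               List.tail_cons, List.tail_nil, List.nil_append, List.append_nil]) <;>
             (first
               | omega
               | (refine leafKey _ _ _ _ _ _ _ ?_ (by simp <;> omega) ?_ <;>
                  (first
                    | omega
                    | (rw [(by omega : max_total.toNat - sel.length = 1)] <;> simp)
                    | (rw [(by omega : max_total.toNat - sel.length = 2)] <;> simp)
                    | (rw [(by omega : max_total.toNat - sel.length = 3)] <;> simp)
                    | (rw [List.take_of_length_le (by simp <;> omega)] <;>
                       simp [List.append_assoc])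
                    | (intro _ <;> rfl)
                    | (intro hh <;> simp at hh <;> omega))))))
    · rw [(by omega : max_total.toNat - sel.length = 0)]
      simp [pvLoopA, hlt]

lemma sorted2_eq_sorted_lex (xs : List ((Int × Int) × List (String × String))) :
    PySem.List.sorted2 xs (fun e => e.1.1) (fun e => e.1.2) =
      PySem.List.sorted xs (fun e => toLex (e.1.1, e.1.2)) := by
  rw [PySem.List.sorted_eq_foldl_insertBy]
  show List.foldl (fun acc x => PySem.List.insertBy _ x acc) [] xs = _
  congr 1
  funext acc x
  congr 1
  funext a b
  show (decide (a.1.1 < b.1.1) || !decide (b.1.1 < a.1.1) && decide (a.1.2 < b.1.2)) =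
    decide (toLex (a.1.1, a.1.2) < toLex (b.1.1, b.1.2))
  by_cases h1 : a.1.1 < b.1.1 <;> by_cases h2 : b.1.1 < a.1.1 <;>
    by_cases h3 : a.1.2 < b.1.2 <;>
    simp [h1, h2, h3, Prod.Lex.toLex_lt_toLex] <;> omega


-- ===== VERDICT (by name: the statement is the Claim_ definition above) =====
theorem select_media_for_ai_prompt_spec : Claim_equal_select_media_for_ai_prompt := by
  intro items max_total _
  unfold Spec_select_media_for_ai_prompt select_media_for_ai_prompt select_media_for_ai_prompt_alt
  by_cases hg : max_total ≤ 0 || items.isEmpty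
  · simp [hg]
  · have h0 : (0 : Int) ≤ max_total := by simp at hg; omega
    simp only [hg, Bool.false_eq_true, not_false_iff, if_false]
    rw [loopA_eq_aux, PySem.List.slice_to _ h0]
    · have hperm1 : (pvKeyedFold items).1.Perm
          (pvAnnot4 0 (pvBuckets items).1 (pvBuckets items).2.1
            (pvBuckets items).2.2.1 (pvBuckets items).2.2.2) := by
        have := keyedFold_inv items [] [] [] [] [] (by simp [pvAnnot4, pvAnnot])
        rw [pvKeyedFold_eq, pvBuckets_eq]
        simpa using this
      have hperm2 := pvKRF_perm
        ((pvBuckets items).1.length + (pvBuckets items).2.1.length +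
          (pvBuckets items).2.2.1.length + (pvBuckets items).2.2.2.length) 0
        (pvBuckets items).1 (pvBuckets items).2.1 (pvBuckets items).2.2.1 (pvBuckets items).2.2.2
        (le_refl _)
      have hsorted := PySem.List.sorted_eq_of_perm_of_pairwise_lt
        ((pvKeyedFold items).1)
        (pvKRF ((pvBuckets items).1.length + (pvBuckets items).2.1.length +
          (pvBuckets items).2.2.1.length + (pvBuckets items).2.2.2.length) 0
          (pvBuckets items).1 (pvBuckets items).2.1 (pvBuckets items).2.2.1 (pvBuckets items).2.2.2)
        (fun e => toLex (e.1.1, e.1.2))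
        (hperm2.trans hperm1.symm)
        (pvKRF_pairwise _ _ _ _ _ _)
      rw [sorted2_eq_sorted_lex, hsorted, List.map_take, pvKRF_map_snd]
      simp only [List.drop_zero, List.nil_append, List.length_nil, Nat.sub_zero]
      rfl
    · omega
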